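/- GENERATED by mk_final_copies.py from the proof of the farm's unit `vorbis_decode_packet_rest.3a` (farm:vorbis_decode_packet_rest.3a.1: Lemmas.lean) as the
   re-elaboration sweep compiled it — do not edit. -/
import Asan.CheckWalk
import Vorbis.Spec.PacketRestFrame
import Vorbis.Spec.PacketRestTest
import Vorbis.Spec.ReaderLemmas
import Vorbis.Spec.Units.vorbis_decode_packet_rest_3a

/-
  THE LEMMAS OF UNIT vorbis_decode_packet_rest.3a (segment .3 up to the join 0x110f3b).
  ADAPTED from the Lemmas.lean of the worker of the parent unit vorbis_decode_packet_rest.3 (attempt 1, against freeze-5): the moved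
  declarations (`seg3Wins`, `Head3Slots`, `At3Mid`, `seg3Wins_through_callee`, `seg3Wins_push`, `Head3Slots.through`, the labels
  `at_110f3b` / `at_110fc2`) are the tree's (Vorbis/Spec/PacketRest3.lean). The worker's own carry lemmas (`stable_step` … `at4_step`,
  section Pure) are kept as they were: `stable_step` is an instance of the tree's `Stable.carry` (Vorbis/Spec/PacketRestFrame.lean),
  which a new proof should use instead.
-/
open X86 X86.User Asan Vorbis Vorbis.Spec Vorbis.Spec.vorbis_decode_packet_rest

set_option maxRecDepth 4000
set_option maxHeartbeats 4000000

namespace Vorbis.Spec.vorbis_decode_packet_rest_3a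
section Pure
variable {u₀ : State} {others : List Obj} {frames : List (Nat × FrameLayout)} {len : Nat} {Ar : Arena}
  {stored room : Int} {mode : Nat} {ysz : Nat → Nat} {u : State} {ret : Word} {ls : Int} {v w : State}

/-- **A read of the own frame off the segment's stack windows is unchanged**: above `[rsp + 0x3c]`, or the slots `[rsp + 8]`,
`[rsp + 0x20 .. 0x2c)` between the windows. -/
theorem read_kept (hst : Stable u₀ others frames len Ar stored room mode ysz u ret ls v)
    (hsame : Mem.SameExcept (seg3Wins u) v.mem w.mem) (a : Word) (n : Nat)
    (h1 : (u.reg .rsp).toNat - 2940 ≤ a.toNat ∨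
      ((u.reg .rsp).toNat - 2992 ≤ a.toNat ∧ a.toNat + n ≤ (u.reg .rsp).toNat - 2984) ∨
      ((u.reg .rsp).toNat - 2968 ≤ a.toNat ∧ a.toNat + n ≤ (u.reg .rsp).toNat - 2956))
    (h2 : a.toNat + n ≤ 0x800030) :
    w.mem.readLE a n = v.mem.readLE a n := by
  have hoff := hst.inv.objOff
  simp only [voff] at hoff
  have hroom := hst.entry.room
  have htop := hst.entry.top
  simp only [Vorbis.conv_stackLo, Vorbis.conv_stackHi] at hroom htop
  apply hsame.readLE a n (by omega)
  intro s hs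
  have := seg3Wins_mem hs
  omega

/-- **Every window of the segment is a decode-time store** (`StoreOK`): the stack windows are off every allocated block, the
windows of `*f` lie in its decode-time holes. -/
theorem segWins_storeOK (hst : Stable u₀ others frames len Ar stored room mode ysz u ret ls v) (s : Span)
    (hs : s ∈ seg3Wins u) : StoreOK (RunBlk Ar len) v.mem (fOf u) s := by
  have hroom := hst.entry.room
  have htop := hst.entry.top
  simp only [Vorbis.conv_stackLo, Vorbis.conv_stackHi] at hroom htop
  have hoffs := hst.inv.offStack
  rcases seg3Wins_mem hs with h | h | h | h | h | h | h | h
  · apply StoreOK.off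
    intro B hB
    have := hoffs B hB
    omega
  · apply StoreOK.off
    intro B hB
    have := hoffs B hB
    omega
  · apply StoreOK.off
    intro B hB
    have := hoffs B hB
    omega
  all_goals
    apply StoreOK.hole
    unfold InHole
    omega

/-- **The decode-time invariant after the segment's stores**, given `Bits` of the new memory (a callee's post, or
`Bits.store_valid_bits` / `Bits.store_other` for the inline DECODE's own stores). -/
theorem seg3_inv_step (hst : Stable u₀ others frames len Ar stored room mode ysz u ret ls v)
    (hsame : Mem.SameExcept (seg3Wins u) v.mem w.mem) (hun : ShadowUntouched v.mem w.mem)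
    (hbits : Bits (RunBlk Ar len) len w.mem (fOf u)) :
    DecodeInv others (framesIn frames u) len Ar stored room ysz w.mem (fOf u) := by
  have hinv := hst.inv
  have hoff := hinv.objOff
  have hfin := hinv.fb.vorbis.bits.OBR
  simp only [voff] at hoff hfin
  have hroom := hst.entry.room
  have htop := hst.entry.top
  simp only [Vorbis.conv_stackLo, Vorbis.conv_stackHi] at hroom htop
  have henv : Env (RunBlk Ar len) (Asan.Live (stackObjs (framesIn frames u) ++ others)) w.mem := hinv.fb.env.eqOn hun
  have hado : ADO Ar others w.mem (fOf u) := by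
    apply hinv.fb.ado.frame_stores hsame (by simp only [voff]; omega)
    · intro s hs
      have := seg3Wins_mem hs
      omega
    · intro s hs
      have := seg3Wins_mem hs
      omega
  have h7 : Mdct.M7Range w.mem (fOf u) := by
    apply hinv.fb.vorbis.buffers.M7.transfer
    apply ObjEq.of_sameExcept hsame
    · intro x hx
      simp only [Mdct.M7Range.wins, List.mem_cons, List.mem_nil_iff, or_false] at hx
      rcases hx with rfl | rfl <;> simp only [] <;> omega
    · intro x hx s hs
      have := seg3Wins_mem hs
      simp only [Mdct.M7Range.wins, List.mem_cons, List.mem_nil_iff, or_false] at hx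
      rcases hx with rfl | rfl <;> simp only [] <;> omega
  have hw1 : W1 w.mem (fOf u) := by
    apply hinv.fb.vorbis.w1.transfer
    apply ObjEq.of_sameExcept hsame
    · intro x hx
      simp only [W1.wins, List.mem_cons, List.mem_nil_iff, or_false] at hx
      rcases hx with rfl | rfl <;> simp only [] <;> omega
    · intro x hx s hs
      have := seg3Wins_mem hs
      simp only [W1.wins, List.mem_cons, List.mem_nil_iff, or_false] at hx
      rcases hx with rfl | rfl <;> simp only [] <;> omega
  exact hinv.frame_stores hsame (segWins_storeOK hst) henv hado (fun _ => hbits) (fun _ => h7) (fun _ => hw1)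

/-- **The configuration part of `*f` (`[f + 144, f + 1484)`: block sizes, the pointers, the mode records, `finalY[]`) reads the
same after the segment's stores.** -/
theorem config_eqOn (hst : Stable u₀ others frames len Ar stored room mode ysz u ret ls v)
    (hsame : Mem.SameExcept (seg3Wins u) v.mem w.mem) : Mem.EqOn (fOf u + 144) (fOf u + 1484) v.mem w.mem := by
  have hoff := hst.inv.objOff
  simp only [voff] at hoff
  have hroom := hst.entry.room
  have htop := hst.entry.top
  simp only [Vorbis.conv_stackLo, Vorbis.conv_stackHi] at hroom htop
  apply hsame.eqOn
  intro s hs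
  have := seg3Wins_mem hs
  omega

/-- **STABLE after the segment's stores** (the step every exit of the segment needs): the memory changed only inside `seg3Wins`,
no shadow byte was written, `Bits` holds in the new memory, the stack pointer is the steady one. -/
theorem stable_step (hst : Stable u₀ others frames len Ar stored room mode ysz u ret ls v)
    (hsame : Mem.SameExcept (seg3Wins u) v.mem w.mem) (hun : ShadowUntouched v.mem w.mem)
    (hbits : Bits (RunBlk Ar len) len w.mem (fOf u))
    (hrsp : w.reg .rsp = u.reg .rsp - 3000) (hcode : Vorbis.CodeOK u₀ w.mem) (habi : abiInv w) :
    Stable u₀ others frames len Ar stored room mode ysz u ret ls w := by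
  have hinv := hst.inv
  have hoff := hinv.objOff
  have hfin := hinv.fb.vorbis.bits.OBR
  simp only [voff] at hoff hfin
  have hroom := hst.entry.room
  have htop := hst.entry.top
  simp only [Vorbis.conv_stackLo, Vorbis.conv_stackHi] at hroom htop
  have hE := config_eqOn hst hsame
  obtain ⟨hsh, hinvu, hargs⟩ := hst.pre
  -- the mode record and the block sizes
  have hmd := hinvu.fb.vorbis.mode.MD1
  have hmlt := hargs.mode_lt
  have hm : mOf u = fOf u + 484 + 6 * mode := by
    rw [hargs.m_eq]
    simp only [vacc, voff]
  have e_bf : Mode.blockflag w.mem (mOf u) = Mode.blockflag v.mem (mOf u) := by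
    simp only [vacc, voff]
    apply hE.u8 <;> omega
  have e_b0 : stb_vorbis.blocksize_0 w.mem (fOf u) = stb_vorbis.blocksize_0 v.mem (fOf u) := by
    simp only [vacc, voff]
    apply hE.i32 <;> omega
  have e_b1 : stb_vorbis.blocksize_1 w.mem (fOf u) = stb_vorbis.blocksize_1 v.mem (fOf u) := by
    simp only [vacc, voff]
    apply hE.i32 <;> omega
  have e_n : nOf w.mem (fOf u) (mOf u) = nOf v.mem (fOf u) (mOf u) := by
    unfold nOf bsize
    rw [e_bf, e_b0, e_b1]
  -- where `p_left` points
  have hleft := hargs.left_obj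
  have hlw := hleft.1.where_ hsh.inv hsh.offText (by omega)
  have hl2 := hleft.2
  refine
    { entry := hst.entry
      pre := hst.pre
      rsp := hrsp
      code := hcode
      abi := habi
      same := ?_
      ra := ?_
      s_r15 := ?_
      s_r14 := ?_
      s_r13 := ?_
      s_r12 := ?_
      s_rbp := ?_
      s_rbx := ?_
      shadow := hst.shadow.untouched hun
      inv := seg3_inv_step hst hsame hun hbits
      slot_f := ?_
      slot_len := ?_
      slot_m := ?_
      slot_ls := ?_
      slot_rs := ?_
      slot_n := ?_
      slot_n2 := ?_
      slot_sb := ?_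
      arg_re := ?_
      arg_left := ?_
      left_val := ?_ }
  ·
    apply hst.same.step_same hsame
    intro s hs a h1 h2
    apply covered_footprint
    rcases seg3Wins_mem hs with h | h | h | h | h | h | h | h
    · exact Or.inl (by omega)
    · exact Or.inl (by omega)
    · exact Or.inl (by omega)
    · exact Or.inr (Or.inl ⟨⟨fOf u + 48, fOf u + 56⟩, by simp only [holes, List.mem_cons, true_or], by simp only []; omega, by simp only []; omega⟩)
    · exact Or.inr (Or.inl ⟨⟨fOf u + 80, fOf u + 112⟩, by simp only [holes, List.mem_cons, true_or, or_true], by simp only []; omega, by simp only []; omega⟩)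
    · exact Or.inr (Or.inl ⟨⟨fOf u + 132, fOf u + 144⟩, by simp only [holes, List.mem_cons, true_or, or_true], by simp only []; omega, by simp only []; omega⟩)
    · exact Or.inr (Or.inl ⟨⟨fOf u + 1480, fOf u + 1808⟩, by simp only [holes, List.mem_cons, List.mem_nil_iff, or_true, or_false], by simp only []; omega, by simp only []; omega⟩)
    · exact Or.inr (Or.inl ⟨⟨fOf u + 1480, fOf u + 1808⟩, by simp only [holes, List.mem_cons, List.mem_nil_iff, or_true, or_false], by simp only []; omega, by simp only []; omega⟩)
  ·
    rw [read_kept hst hsame _ 8 (by u_omega) (by u_omega)]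
    exact hst.ra
  ·
    rw [read_kept hst hsame _ 8 (by u_omega) (by u_omega)]
    exact hst.s_r15
  ·
    rw [read_kept hst hsame _ 8 (by u_omega) (by u_omega)]
    exact hst.s_r14
  ·
    rw [read_kept hst hsame _ 8 (by u_omega) (by u_omega)]
    exact hst.s_r13
  ·
    rw [read_kept hst hsame _ 8 (by u_omega) (by u_omega)]
    exact hst.s_r12
  ·
    rw [read_kept hst hsame _ 8 (by u_omega) (by u_omega)]
    exact hst.s_rbp
  ·
    rw [read_kept hst hsame _ 8 (by u_omega) (by u_omega)]
    exact hst.s_rbx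
  ·
    show w.mem.readLE (u.reg .rsp - 3000 + 0x40) 8 = _
    rw [read_kept hst hsame _ 8 (by u_omega) (by u_omega)]
    exact hst.slot_f
  ·
    show w.mem.readLE (u.reg .rsp - 3000 + 0x68) 8 = _
    rw [read_kept hst hsame _ 8 (by u_omega) (by u_omega)]
    exact hst.slot_len
  ·
    show w.mem.readLE (u.reg .rsp - 3000 + 0x70) 8 = _
    rw [read_kept hst hsame _ 8 (by u_omega) (by u_omega)]
    exact hst.slot_m
  ·
    show sint32 (w.mem.readLE (u.reg .rsp - 3000 + 0x78) 4) = _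
    rw [read_kept hst hsame _ 4 (by u_omega) (by u_omega)]
    exact hst.slot_ls
  ·
    show sint32 (w.mem.readLE (u.reg .rsp - 3000 + 0x7c) 4) = _
    rw [read_kept hst hsame _ 4 (by u_omega) (by u_omega)]
    exact hst.slot_rs
  ·
    show w.mem.readLE (u.reg .rsp - 3000 + 0x50) 4 = _
    rw [read_kept hst hsame _ 4 (by u_omega) (by u_omega), e_n]
    exact hst.slot_n
  ·
    show w.mem.readLE (u.reg .rsp - 3000 + 0x3c) 4 = _
    rw [read_kept hst hsame _ 4 (by u_omega) (by u_omega), e_n]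
    exact hst.slot_n2
  ·
    show w.mem.readLE (u.reg .rsp - 3000 + 0x60) 8 = _
    rw [read_kept hst hsame _ 8 (by u_omega) (by u_omega)]
    exact hst.slot_sb
  ·
    rw [read_kept hst hsame _ 4 (by u_omega) (by u_omega)]
    exact hst.arg_re
  ·
    rw [read_kept hst hsame _ 8 (by u_omega) (by u_omega)]
    exact hst.arg_left
  ·
    have ea : (addr (pLeftOf u)).toNat = pLeftOf u := toNat_addr _ (by omega)
    show sint32 (w.mem.readLE (addr (pLeftOf u)) 4) = _
    rw [read_kept hst hsame _ 4 (by rw [ea]; omega) (by rw [ea]; omega)]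
    exact hst.left_val

/-- The first fields of `*f` (`[f, f + 48)`: `channels` …) read the same after the segment's stores. -/
theorem low_eqOn (hst : Stable u₀ others frames len Ar stored room mode ysz u ret ls v)
    (hsame : Mem.SameExcept (seg3Wins u) v.mem w.mem) : Mem.EqOn (fOf u) (fOf u + 48) v.mem w.mem := by
  have hoff := hst.inv.objOff
  simp only [voff] at hoff
  have hroom := hst.entry.room
  have htop := hst.entry.top
  simp only [Vorbis.conv_stackLo, Vorbis.conv_stackHi] at hroom htop
  apply hsame.eqOn
  intro s hs
  have := seg3Wins_mem hs
  omega

/-- The block of the floor records reads the same after the segment's stores. -/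
theorem floor_kept (hst : Stable u₀ others frames len Ar stored room mode ysz u ret ls v)
    (hsame : Mem.SameExcept (seg3Wins u) v.mem w.mem) : (floorBlock v.mem (fOf u)).Kept v.mem w.mem :=
  StoreOK.reads_kept hst.inv.config hst.inv.ok hst.inv.sep hsame (segWins_storeOK hst) _ ConfigOK.Reads.floor

/-- A floor of `f` is still one after the segment's stores, and its record reads the same. -/
theorem floor_step (hst : Stable u₀ others frames len Ar stored room mode ysz u ret ls v)
    (hsame : Mem.SameExcept (seg3Wins u) v.mem w.mem) {g : Nat} (hg : IsFloor v.mem (fOf u) g) :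
    IsFloor w.mem (fOf u) g ∧ (Block.mk g Off.sizeof.Floor).Kept v.mem w.mem := by
  have hoff := hst.inv.objOff
  have hfin := hst.inv.fb.vorbis.bits.OBR
  simp only [voff] at hoff hfin
  have hroom := hst.entry.room
  have htop := hst.entry.top
  simp only [Vorbis.conv_stackLo, Vorbis.conv_stackHi] at hroom htop
  constructor
  · apply FloorShape.isFloor_frame _ hg
    apply FloorHdrEq.of_objEq
    apply ObjEq.of_sameExcept hsame
    · intro x hx
      simp only [FloorsOK.wins, List.mem_cons, List.mem_nil_iff, or_false] at hx
      subst hx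
      simp only []
      omega
    · intro x hx s hs
      have := seg3Wins_mem hs
      simp only [FloorsOK.wins, List.mem_cons, List.mem_nil_iff, or_false] at hx
      subst hx
      simp only []
      omega
  · exact hst.inv.fb.vorbis.floor.toFloorShape.elem_kept hg (floor_kept hst hsame)

/-- The three ghost values of the channel that the assertions restate with the current memory: `channels`, `finalY[i]`, `map`. -/
theorem chan_step (hst : Stable u₀ others frames len Ar stored room mode ysz u ret ls v)
    (hsame : Mem.SameExcept (seg3Wins u) v.mem w.mem) (i : Nat) (hi : (i : Int) < stb_vorbis.channels v.mem (fOf u)) :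
    stb_vorbis.channels w.mem (fOf u) = stb_vorbis.channels v.mem (fOf u) ∧
    stb_vorbis.finalY w.mem (fOf u) i = stb_vorbis.finalY v.mem (fOf u) i ∧
    mapOf w.mem (fOf u) (mOf u) = mapOf v.mem (fOf u) (mOf u) := by
  have hfin := hst.inv.fb.vorbis.bits.OBR
  simp only [voff] at hfin
  have hE := config_eqOn hst hsame
  have hL := low_eqOn hst hsame
  obtain ⟨hsh, hinvu, hargs⟩ := hst.pre
  have hmd := hinvu.fb.vorbis.mode.MD1
  have hmlt := hargs.mode_lt
  have hm : mOf u = fOf u + 484 + 6 * mode := by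
    rw [hargs.m_eq]
    simp only [vacc, voff]
  have hch := hst.inv.config.header.HD1
  refine ⟨?_, ?_, ?_⟩
  · simp only [vacc, voff]
    apply hL.i32 <;> omega
  · simp only [vacc, voff]
    apply hE.u64 <;> omega
  · unfold mapOf
    simp only [vacc, voff]
    have e1 : w.mem.u64 (fOf u + 472) = v.mem.u64 (fOf u + 472) := by
      apply hE.u64 <;> omega
    have e2 : w.mem.u8 (mOf u + 1) = v.mem.u8 (mOf u + 1) := by
      apply hE.u8 <;> omega
    rw [e1, e2]

/-- **The exit assertion `At5` (0x111000, `j ≥ partitions`) from `At3` at the segment's entry and the facts of the walk.** -/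
theorem at5_step {i j : Nat} (hat : At3 u₀ others frames len Ar stored room mode ysz u ret i j v)
    (hsame : Mem.SameExcept (seg3Wins u) v.mem w.mem) (hun : ShadowUntouched v.mem w.mem)
    (hbits : Bits (RunBlk Ar len) len w.mem (fOf u))
    (hrsp : w.reg .rsp = u.reg .rsp - 3000) (hcode : Vorbis.CodeOK u₀ w.mem) (habi : abiInv w)
    (hrip : w.rip = Vorbis.L.vorbis_decode_packet_rest.cut9) (hr15 : w.reg .r15 = v.reg .r15) :
    At5 u₀ others frames len Ar stored room mode ysz u ret i w := by
  have hst := hat.toStable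
  have hroom := hst.entry.room
  have htop := hst.entry.top
  simp only [Vorbis.conv_stackLo, Vorbis.conv_stackHi] at hroom htop
  obtain ⟨ec, ey, em⟩ := chan_step hst hsame i hat.i_lt
  refine
    { toStable := stable_step hst hsame hun hbits hrsp hcode habi
      rip := hrip
      g := ?_
      slot_i := ?_
      i_lt := ?_
      slot_finalY := ?_
      slot_map := ?_ }
  · rw [hr15]
    exact (floor_step hst hsame hat.g).1
  · show w.mem.readLE (u.reg .rsp - 3000 + 0x54) 4 = _
    rw [read_kept hst hsame _ 4 (by u_omega) (by u_omega)]
    exact hat.slot_i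
  · rw [ec]
    exact hat.i_lt
  · show w.mem.readLE (u.reg .rsp - 3000 + 0x20) 8 = _
    rw [read_kept hst hsame _ 8 (by u_omega) (by u_omega), ey]
    exact hat.slot_finalY
  · show w.mem.readLE (u.reg .rsp - 3000 + 0x58) 8 = _
    rw [read_kept hst hsame _ 8 (by u_omega) (by u_omega), em]
    exact hat.slot_map

/-- **The exit assertion `At4` (0x110d0a, `k = 0`) from `At3` at the segment's entry and the facts of the walk**: the four slots
of the head (`Head3Slots`, in terms of the floor read in the ENTRY memory), `[rsp + 0x18] = g`, `r14d = 0`. -/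
theorem at4_step {i j : Nat} (hat : At3 u₀ others frames len Ar stored room mode ysz u ret i j v)
    (hsame : Mem.SameExcept (seg3Wins u) v.mem w.mem) (hun : ShadowUntouched v.mem w.mem)
    (hbits : Bits (RunBlk Ar len) len w.mem (fOf u))
    (hrsp : w.reg .rsp = u.reg .rsp - 3000) (hcode : Vorbis.CodeOK u₀ w.mem) (habi : abiInv w)
    (hrip : w.rip = Vorbis.L.vorbis_decode_packet_rest.cut7) (hrbp : w.reg .rbp = v.reg .rbp) (hr14 : w.reg .r14 = 0)
    (hlt : j < Floor1.partitions v.mem (v.reg .r15).toNat)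
    (slots : Head3Slots u v w (v.reg .r15).toNat (Floor1.partition_class_list v.mem (v.reg .r15).toNat j))
    (s18 : w.mem.readLE (u.reg .rsp - 2976) 8 = (v.reg .r15).toNat) :
    At4 u₀ others frames len Ar stored room mode ysz u ret i j w := by
  have hst := hat.toStable
  have hroom := hst.entry.room
  have htop := hst.entry.top
  simp only [Vorbis.conv_stackLo, Vorbis.conv_stackHi] at hroom htop
  obtain ⟨ec, ey, em⟩ := chan_step hst hsame i hat.i_lt
  generalize hg : (v.reg .r15).toNat = g at *
  generalize hpc : Floor1.partition_class_list v.mem g j = pc at *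
  have hgF : IsFloor v.mem (fOf u) g := by
    rw [← hg]
    exact hat.g
  have hoffs := hat.slot_offset
  rw [hg] at hoffs
  obtain ⟨hgF', hk⟩ := floor_step hst hsame hgF
  have hg1 := hst.inv.fb.vorbis.floor.floor hgF
  have h4 := hg1.FL4
  have hpc256 : pc < 256 := by
    rw [← hpc]
    exact Floor1.partition_class_list_lt _ _ _
  have hcb3 : Floor1.class_subclasses v.mem g pc ≤ 3 := by
    have := (hg1.FL6 j hlt).sub
    rw [hpc] at this
    exact this
  obtain ⟨s38, s10, s2c, s30⟩ := slots
  have e18 : slot64 u w 0x18 = g := by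
    show w.mem.readLE (u.reg .rsp - 3000 + 0x18) 8 = g
    rw [show u.reg .rsp - 3000 + 0x18 = u.reg .rsp - 2976 by u_omega]
    exact s18
  have e38 : slot32 u w 0x38 = pc := by
    show w.mem.readLE (u.reg .rsp - 3000 + 0x38) 4 = pc
    rw [show u.reg .rsp - 3000 + 0x38 = u.reg .rsp - 2944 by u_omega]
    exact s38
  have e10 : slot32 u w 0x10 = Floor1.class_dimensions v.mem g pc := by
    show w.mem.readLE (u.reg .rsp - 3000 + 0x10) 4 = _
    rw [show u.reg .rsp - 3000 + 0x10 = u.reg .rsp - 2984 by u_omega]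
    exact s10
  have e2c : slot32 u w 0x2c = Floor1.class_subclasses v.mem g pc := by
    show w.mem.readLE (u.reg .rsp - 3000 + 0x2c) 4 = _
    rw [show u.reg .rsp - 3000 + 0x2c = u.reg .rsp - 2956 by u_omega]
    exact s2c
  have e30 : slot32 u w 0x30 = 2 ^ Floor1.class_subclasses v.mem g pc - 1 := by
    show w.mem.readLE (u.reg .rsp - 3000 + 0x30) 4 = _
    rw [show u.reg .rsp - 3000 + 0x30 = u.reg .rsp - 2952 by u_omega, s30, Nat.mod_eq_of_lt (by omega)]
    exact mask_toNat _ (by omega)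
  refine
    { toStable := stable_step hst hsame hun hbits hrsp hcode habi
      rip := hrip
      rbp := ?_
      r14 := hr14
      g := ?_
      slot_j := ?_
      j_lt := ?_
      slot_pclass := ?_
      slot_cdim := ?_
      slot_cbits := ?_
      slot_csub := ?_
      slot_offset := ?_
      slot_i := ?_
      i_lt := ?_
      slot_finalY := ?_
      slot_map := ?_ }
  · rw [hrbp]
    exact hat.rbp
  · rw [e18]
    exact hgF'
  · show w.mem.readLE (u.reg .rsp - 3000 + 0x48) 4 = _
    rw [read_kept hst hsame _ 4 (by u_omega) (by u_omega)]
    exact hat.slot_j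
  · rw [e18, Floor1.same_partitions hk.same hk.inside]
    exact hlt
  · rw [e38, e18, Floor1.same_partition_class_list hk.same hk.inside j (by omega)]
    exact hpc.symm
  · rw [e10, e18, e38, Floor1.same_class_dimensions hk.same hk.inside pc hpc256]
  · rw [e2c, e18, e38, Floor1.same_class_subclasses hk.same hk.inside pc hpc256]
  · rw [e30, e2c]
  · show w.mem.readLE (u.reg .rsp - 3000 + 0x8) 4 = _
    rw [read_kept hst hsame _ 4 (by u_omega) (by u_omega), e18, Floor1.same_dimSum hk.same hk.inside j (by omega)]
    exact hoffs
  · show w.mem.readLE (u.reg .rsp - 3000 + 0x54) 4 = _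
    rw [read_kept hst hsame _ 4 (by u_omega) (by u_omega)]
    exact hat.slot_i
  · rw [ec]
    exact hat.i_lt
  · show w.mem.readLE (u.reg .rsp - 3000 + 0x20) 8 = _
    rw [read_kept hst hsame _ 8 (by u_omega) (by u_omega), ey]
    exact hat.slot_finalY
  · show w.mem.readLE (u.reg .rsp - 3000 + 0x58) 8 = _
    rw [read_kept hst hsame _ 8 (by u_omega) (by u_omega), em]
    exact hat.slot_map

end Pure
/-- The signed value of a zero-extended byte. -/
theorem zx8_toInt (n : Nat) (h : n < 256) : (BitVec.zeroExtend 32 (BitVec.ofNat 8 n)).toInt = (n : Int) := by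
  have e : (BitVec.zeroExtend 32 (BitVec.ofNat 8 n)).toNat = n := by
    simp only [BitVec.toNat_setWidth, BitVec.toNat_ofNat]
    omega
  rw [toInt_of_lt _ (by omega), e]

/-- The number of a zero-extended byte. -/
theorem zx8_toNat (n : Nat) (h : n < 256) : (BitVec.zeroExtend 32 (BitVec.ofNat 8 n)).toNat = n := by
  simp only [BitVec.toNat_setWidth, BitVec.toNat_ofNat]
  omega

/-- The signed value of a small dword. -/
theorem ofNat32_toInt (n : Nat) (h : n < 2 ^ 31) : (BitVec.ofNat 32 n).toInt = (n : Int) := by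
  have e : (BitVec.ofNat 32 n).toNat = n := toNat_ofNat32 n (by omega)
  rw [toInt_of_lt _ (by omega), e]

/-- `movsxd` of a zero-extended byte is the byte. -/
theorem sx_zx8 (n : Nat) (h : n < 256) :
    Word.ofBV (BitVec.signExtend 64 (BitVec.zeroExtend 32 (BitVec.ofNat 8 n))) = addr n := by
  rw [ofBV_signExtend64, zx8_toInt n h, word_nonneg _ (by omega)]
  rfl

/-- `movsxd` of a small dword is the number. -/
theorem sx_dword (n : Nat) (h : n < 2 ^ 31) : Word.ofBV (BitVec.signExtend 64 (BitVec.ofNat 32 n)) = addr n := by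
  rw [ofBV_signExtend64, ofNat32_toInt n h, word_nonneg _ (by omega)]
  rfl

/-- A zero-extended byte in a register. -/
theorem ofBV_zx8 (n : Nat) (h : n < 256) : Word.ofBV (BitVec.zeroExtend 32 (BitVec.ofNat 8 n)) = addr n := by
  rw [ofBV_eq_addr _ (by omega), zx8_toNat n h]


/-- The number of a byte that went through `movzx ecx, byte ; movzx edx, cl`. -/
theorem zx_sw_zx8 (n : Nat) (h : n < 256) :
    (BitVec.zeroExtend 32 (BitVec.setWidth 8 (BitVec.zeroExtend 32 (BitVec.ofNat 8 n)))).toNat = n := by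
  simp only [BitVec.toNat_setWidth, BitVec.toNat_ofNat]
  omega

/-- The number of `cl` after `movzx ecx, byte`. -/
theorem sw_zx8 (n : Nat) (h : n < 256) : (BitVec.setWidth 8 (BitVec.zeroExtend 32 (BitVec.ofNat 8 n))).toNat = n := by
  simp only [BitVec.toNat_setWidth, BitVec.toNat_ofNat]
  omega

/-- A zero-extended byte as the 64-bit operand of `imul rax, rax, 0x848`. -/
theorem sw64_zx8 (n : Nat) (h : n < 256) :
    Word.ofBV (BitVec.setWidth 64 (BitVec.zeroExtend 32 (BitVec.ofNat 8 n))) = addr n := by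
  rw [ofBV_eq_addr _ (Nat.le_refl _)]
  congr 1
  simp only [BitVec.toNat_setWidth, BitVec.toNat_ofNat]
  omega

/-- **What every stop of the head walk keeps of `v`, the state at the segment's entry 0x110e7e** (`u` = the function's entry
state): the steady stack pointer, `rbp = f`, `r15 = g`, the text, DF / MXCSR, no shadow byte written, and the memory changed only
in three windows of the own frame: the callee area and `[rsp + 0]` (cval), `[rsp + 0x10 .. 0x20)` (cdim, g), `[rsp + 0x2c .. 0x3c)`
(cbits, csub, pclass). The slots `[rsp + 8]` (offset) and `[rsp + 0x20]` (finalY) lie between the windows. -/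
structure HeadKeeps (u₀ u v w : State) : Prop where
  rsp : w.reg .rsp = u.reg .rsp - 3000
  rbp : w.reg .rbp = v.reg .rbp
  r15 : w.reg .r15 = v.reg .r15
  code : Mem.EqOn Vorbis.L.textLo Vorbis.L.textHi u₀.mem w.mem
  abi : abiInv w
  same : Mem.SameExcept [⟨(u.reg .rsp).toNat - 3856, (u.reg .rsp).toNat - 2992⟩,
    ⟨(u.reg .rsp).toNat - 2984, (u.reg .rsp).toNat - 2968⟩,
    ⟨(u.reg .rsp).toNat - 2956, (u.reg .rsp).toNat - 2940⟩] v.mem w.mem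
  un : ShadowUntouched v.mem w.mem

/-- The three stack windows of the head are windows of `seg3Wins`. -/
theorem HeadKeeps.segSame {u₀ u v w : State} (h : HeadKeeps u₀ u v w) : Mem.SameExcept (seg3Wins u) v.mem w.mem := by
  apply h.same.mono
  intro s hs a h1 h2
  refine ⟨s, ?_, h1, h2⟩
  simp only [List.mem_cons, List.mem_nil_iff, or_false] at hs
  simp only [seg3Wins, List.mem_cons, List.mem_nil_iff, or_false]
  rcases hs with rfl | rfl | rfl
  · exact Or.inl rfl
  · exact Or.inr (Or.inl rfl)
  · exact Or.inr (Or.inr (Or.inl rfl))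

/-- **The three stops of the head walk** (0x110e7e … 0x110f2e): A `j ≥ partitions` at 0x111000 (→ segment .5); B `cbits = 0` at
0x110d0a (→ segment .4) with `k = 0`, `[0x18] = g`, `[0] = cval = 0`; C `cbits ≠ 0` at 0x110f2e (after the check of
`f->valid_bits`, before `cmp [rbp+0x6e8], 9`) with `r13 = c`, the master book of the class. -/
inductive HeadExit (u₀ u v : State) (f g j : Nat) (w : State) : Prop where
  | done (rip : w.rip = Vorbis.L.vorbis_decode_packet_rest.cut9) (keeps : HeadKeeps u₀ u v w)
      (hge : Floor1.partitions v.mem g ≤ j)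
  | nobits (rip : w.rip = Vorbis.L.vorbis_decode_packet_rest.cut7) (keeps : HeadKeeps u₀ u v w)
      (hlt : j < Floor1.partitions v.mem g)
      (slots : Head3Slots u v w g (Floor1.partition_class_list v.mem g j))
      (cbits : Floor1.class_subclasses v.mem g (Floor1.partition_class_list v.mem g j) = 0)
      (r14 : w.reg .r14 = 0)
      (s18 : w.mem.readLE (u.reg .rsp - 2976) 8 = g)
      (s00 : w.mem.readLE (u.reg .rsp - 3000) 4 = 0)
  | decode (rip : w.rip = Vorbis.L.vorbis_decode_packet_rest.ret29) (keeps : HeadKeeps u₀ u v w)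
      (hlt : j < Floor1.partitions v.mem g)
      (slots : Head3Slots u v w g (Floor1.partition_class_list v.mem g j))
      (cbits : Floor1.class_subclasses v.mem g (Floor1.partition_class_list v.mem g j) ≠ 0)
      (r13 : w.reg .r13 = addr (stb_vorbis.codebooks_at v.mem f
        (Floor1.class_masterbooks v.mem g (Floor1.partition_class_list v.mem g j))))

/-- **THE HEAD OF SEGMENT .3, WALKED** (0x110e7e … 0x110f2e, 41 instructions, 7 check sites): from the entry assertion `At3`
to one of the three stops of `HeadExit`. Every check site on the way is discharged from the invariant (FL2 / FL4 / FL5 for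
the floor, OB1 for `*f`). No callee is called. -/
theorem head_reach (Lay : Layout) (hLay : Lay.hi = 0x1000000) (μ : Microarch) (hμ : UserX.MicroOK μ) (u₀ : State)
    (hcode : HasCodeNat Lay u₀ Vorbis.L.vorbis_decode_packet_rest.entry Vorbis.Code.code_vorbis_decode_packet_rest.nat
      Vorbis.L.vorbis_decode_packet_rest.size)
    (hl1 : Asan.SmallCheck Lay μ Vorbis.WayInv (Vorbis.CodeOK u₀) [.rax, .rdx] 1 Vorbis.L.__asan_load1_noabort.entry)
    (hl8 : Asan.SmallCheck Lay μ Vorbis.WayInv (Vorbis.CodeOK u₀) [.rax, .rcx, .rdx] 8 Vorbis.L.__asan_load8_noabort.entry)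
    (hl4 : Asan.SmallCheck Lay μ Vorbis.WayInv (Vorbis.CodeOK u₀) [.rax, .rcx, .rdx] 4 Vorbis.L.__asan_load4_noabort.entry)
    (others : List Obj) (frames : List (Nat × FrameLayout)) (len : Nat) (Ar : Arena) (stored room : Int)
    (mode : Nat) (ysz : Nat → Nat) (u : State) (ret : Word) (i j : Nat) (v : State)
    (hat : At3 u₀ others frames len Ar stored room mode ysz u ret i j v) :
    ReachVia Lay μ Vorbis.WayInv v (HeadExit u₀ u v (fOf u) (v.reg .r15).toNat j) := by
  have he := hat.entry
  v_entry he
  have w_rip := hat.rip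
  have hv_rsp : v.reg .rsp = u.reg .rsp - 3000 := hat.rsp
  have w_eq : Mem.EqOn Vorbis.L.textLo Vorbis.L.textHi u₀.mem v.mem := hat.code
  clear he_eq
  have hdf : v.flags .df = false := (show abiInv _ from hat.abi).1
  have hmx : v.mxcsr &&& 0x1F80 = 0x1F80 := (show abiInv _ from hat.abi).2
  have hsse := Vorbis.sseOK_of_abiInv hat.abi
  generalize hg : (v.reg .r15).toNat = g
  generalize hf : fOf u = f
  have hv_r15 : v.reg .r15 = addr g := eq_addr _ _ hg
  have hv_rbp : v.reg .rbp = addr f := eq_addr _ _ (hat.rbp.trans hf)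
  have hsj : v.mem.readLE (u.reg .rsp - 2928) 4 = j := by
    have e : u.reg .rsp - 2928 = spOf u + 72 := by
      show u.reg .rsp - 2928 = u.reg .rsp - 3000 + 72
      u_omega
    rw [e]
    exact hat.slot_j
  have hinv := hat.inv
  rw [hf] at hinv
  have hv := hinv.fb.vorbis
  have hok := hinv.ok
  have hlive := hinv.live
  have hfl := hv.floor
  have hgF : IsFloor v.mem f g := by
    rw [← hf, ← hg]
    exact hat.g
  have hg1 := hfl.floor hgF
  have hgin := hfl.toFloorShape.elem_inside hgF hok
  have hgoff : g + 1596 ≤ 0x700000 ∨ 0x800000 ≤ g := by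
    have h1 := hinv.offStack _ hfl.toFloorShape.FL2
    have h2 := hfl.toFloorShape.elem_in hgF (off := 0) (n := Off.sizeof.Floor) (Nat.le_refl _)
    simp only [vblock, voff, Nat.add_zero] at h1 h2
    simp only [voff] at hgin
    omega
  simp only [voff] at hgin
  have hjle : j ≤ Floor1.partitions v.mem g := by
    rw [← hg]
    exact hat.j_le
  have hj32 : j ≤ 31 := by
    have := hg1.FL4
    omega
  have hjw : Word.ofBV (BitVec.signExtend 64 (BitVec.ofNat 32 j)) = addr j := sx_dword j (by omega)
  have L1 : v.mem.readLE (addr g) 1 = Floor1.partitions v.mem g := rfl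
  obtain ⟨pc, hpc⟩ : ∃ pc : Nat, Floor1.partition_class_list v.mem g j = pc := ⟨_, rfl⟩
  have hpc256 : pc < 256 := by
    rw [← hpc]
    exact Floor1.partition_class_list_lt _ _ _
  have eA1 : addr g + addr j + 1 = addr (g + 1 + j) := by
    rw [addr_add_addr, addr_add_lit]
    congr 1
    omega
  have eA2 : addr g + addr pc + 33 = addr (g + 33 + pc) := by
    rw [addr_add_addr, addr_add_lit]
    congr 1
    omega
  have eA3 : addr g + addr pc + 49 = addr (g + 49 + pc) := by
    rw [addr_add_addr, addr_add_lit]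
    congr 1
    omega
  have eA4 : addr g + addr pc + 65 = addr (g + 65 + pc) := by
    rw [addr_add_addr, addr_add_lit]
    congr 1
    omega
  have eF1 : addr f + 168 = addr (f + 168) := addr_add_lit f 168
  have eF2 : addr f + 1768 = addr (f + 1768) := addr_add_lit f 1768
  have eF3 : addr f + 1764 = addr (f + 1764) := addr_add_lit f 1764
  have L3 : v.mem.readLE (addr (g + 1 + j)) 1 = pc := hpc
  have hpcw := sx_zx8 pc hpc256
  have L4 : v.mem.readLE (addr (g + 33 + pc)) 1 = Floor1.class_dimensions v.mem g pc := rfl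
  have L5 : v.mem.readLE (addr (g + 49 + pc)) 1 = Floor1.class_subclasses v.mem g pc := rfl
  have L7 : v.mem.readLE (addr (g + 65 + pc)) 1 = Floor1.class_masterbooks v.mem g pc := rfl
  have L6 : v.mem.readLE (addr (f + 168)) 8 = stb_vorbis.codebooks v.mem f := rfl
  have hfin := hinv.fb.vorbis.bits.OBR
  have hfoff := hinv.objOff
  simp only [voff] at hfin hfoff
  have hT0 : (addr g).toNat = g := toNat_addr _ (by omega)
  have hT1 : (addr (g + 1 + j)).toNat = g + 1 + j := toNat_addr _ (by omega)
  have hT2 : (addr (g + 33 + pc)).toNat = g + 33 + pc := toNat_addr _ (by omega)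
  have hT3 : (addr (g + 49 + pc)).toNat = g + 49 + pc := toNat_addr _ (by omega)
  have hT4 : (addr (g + 65 + pc)).toNat = g + 65 + pc := toNat_addr _ (by omega)
  have hT5 : (addr (f + 168)).toNat = f + 168 := toNat_addr _ (by omega)
  have hT6 : (addr (f + 1768)).toNat = f + 1768 := toNat_addr _ (by omega)
  have hT7 : (addr (f + 1764)).toNat = f + 1764 := toNat_addr _ (by omega)
  have hshadow := hat.shadow
  u_walk hcode [hμ.vendor, hjw, hpcw, eA1, eA2, eA3, eA4, eF1, eF2, eF3] until [Vorbis.L.vorbis_decode_packet_rest.cut7, Vorbis.L.vorbis_decode_packet_rest.cut9, Vorbis.L.vorbis_decode_packet_rest.ret29] span [Vorbis.L.textLo, Vorbis.L.textHi] side (v_side)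
  case check_110e81 =>
    have hun : ShadowUntouched v.mem s_110e81.mem := by v_untouched
    have hs := hfl.toFloorShape.site_partitions hlive hgF (a := g) (by simp only [voff]; omega)
    exact check_site hshadow hun hs hT0
  case check_110ea0 =>
    have hun : ShadowUntouched v.mem s_110ea0.mem := by v_untouched
    have hs := hfl.toFloorShape.site_partition_class_list hlive hgF (j := j) (a := g + 1 + j)
      (by simp only [voff]; omega) (by simp only [voff])
    exact check_site hshadow hun hs hT1
  case check_110eb8 =>
    have hjP : j < Floor1.partitions v.mem g := by
      rw [zx8_toInt _ (Floor1.partitions_lt _ _), ofNat32_toInt j (by omega)] at hbr_110e90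
      omega
    have hpc16 := hg1.FL5 j hjP
    rw [hpc] at hpc16
    have hun : ShadowUntouched v.mem s_110eb8.mem := by v_untouched
    have hs := hfl.toFloorShape.site_class_dimensions hlive hgF (c := pc) (a := g + 33 + pc)
      (by simp only [voff]; omega) (by simp only [voff])
    exact check_site hshadow hun hs hT2
  case check_110ecc =>
    have hjP : j < Floor1.partitions v.mem g := by
      rw [zx8_toInt _ (Floor1.partitions_lt _ _), ofNat32_toInt j (by omega)] at hbr_110e90
      omega
    have hpc16 := hg1.FL5 j hjP
    rw [hpc] at hpc16
    have hun : ShadowUntouched v.mem s_110ecc.mem := by v_untouched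
    have hs := hfl.toFloorShape.site_class_subclasses hlive hgF (c := pc) (a := g + 49 + pc)
      (by simp only [voff]; omega) (by simp only [voff])
    exact check_site hshadow hun hs hT3
  case check_110efb =>
    have hun : ShadowUntouched v.mem s_110efb.mem := by v_untouched
    have hs := hv.bits.site_field hlive 168 8 (by omega) (by omega) (a := f + 168) rfl
    exact check_site hshadow hun hs hT5
  case check_110f0c =>
    have hjP : j < Floor1.partitions v.mem g := by
      rw [zx8_toInt _ (Floor1.partitions_lt _ _), ofNat32_toInt j (by omega)] at hbr_110e90
      omega
    have hpc16 := hg1.FL5 j hjP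
    rw [hpc] at hpc16
    have hun : ShadowUntouched v.mem s_110f0c.mem := by v_untouched
    have hs := hfl.toFloorShape.site_class_masterbooks hlive hgF (c := pc) (a := g + 65 + pc)
      (by simp only [voff]; omega) (by simp only [voff])
    exact check_site hshadow hun hs hT4
  case check_110f29 =>
    have hun : ShadowUntouched v.mem s_110f29.mem := by v_untouched
    have hs := hv.bits.site_field hlive 1768 4 (by omega) (by omega) (a := f + 1768) rfl
    exact check_site hshadow hun hs hT6
  · -- stop A, 0x111000: `j ≥ partitions`
    have hge : Floor1.partitions v.mem g ≤ j := by
      rw [zx8_toInt _ (Floor1.partitions_lt _ _), ofNat32_toInt j (by omega)] at hbr_110e90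
      omega
    refine ReachVia.done (HeadExit.done w_rip ⟨w_rsp, w_kept.get .rbp rfl, w_kept.get .r15 rfl, w_eq, ?_, ?_, ?_⟩ hge)
    · v_inv
    · u_same
    · v_untouched
  · -- stop B, 0x110d0a: `cbits = 0`
    have hjP : j < Floor1.partitions v.mem g := by
      rw [zx8_toInt _ (Floor1.partitions_lt _ _), ofNat32_toInt j (by omega)] at hbr_110e90
      omega
    have hcb256 := Floor1.class_subclasses_lt v.mem g pc
    have hcb0 : Floor1.class_subclasses v.mem g pc = 0 := by
      rw [zx_sw_zx8 _ hcb256] at hbr_110eee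
      exact hbr_110eee
    subst hpc
    refine ReachVia.done (HeadExit.nobits w_rip ⟨w_rsp, w_kept.get .rbp rfl, w_kept.get .r15 rfl, w_eq, ?_, ?_, ?_⟩ hjP
      ⟨?_, ?_, ?_, ?_⟩ hcb0 ?_ ?_ ?_)
    · v_inv
    · u_same
    · v_untouched
    · -- [rsp + 0x38] = pclass
      have h : s_110e6f.mem.readLE (u.reg .rsp - 2944) 4 =
          (BitVec.zeroExtend 32 (BitVec.ofNat 8 (Floor1.partition_class_list v.mem g j))).toNat := by
        u_resolve
        apply Nat.mod_eq_of_lt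
        exact BitVec.isLt _
      rw [h]
      exact zx8_toNat _ hpc256
    · -- [rsp + 0x10] = cdim
      have h : s_110e6f.mem.readLE (u.reg .rsp - 2984) 4 =
          (BitVec.zeroExtend 32 (BitVec.ofNat 8 (Floor1.class_dimensions v.mem g
            (Floor1.partition_class_list v.mem g j)))).toNat := by
        u_resolve
        apply Nat.mod_eq_of_lt
        exact BitVec.isLt _
      rw [h]
      exact zx8_toNat _ (by simp only [vacc]; exact v.mem.u8_lt _)
    · -- [rsp + 0x2c] = cbits
      have h : s_110e6f.mem.readLE (u.reg .rsp - 2956) 4 =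
          (BitVec.zeroExtend 32 (BitVec.setWidth 8 (BitVec.zeroExtend 32 (BitVec.ofNat 8
            (Floor1.class_subclasses v.mem g (Floor1.partition_class_list v.mem g j)))))).toNat := by
        u_resolve
        apply Nat.mod_eq_of_lt
        exact BitVec.isLt _
      rw [h]
      exact zx_sw_zx8 _ hcb256
    · -- [rsp + 0x30] = csub
      have h : s_110e6f.mem.readLE (u.reg .rsp - 2952) 4 =
          (1#32 <<< ((BitVec.setWidth 8 (BitVec.zeroExtend 32 (BitVec.ofNat 8
            (Floor1.class_subclasses v.mem g (Floor1.partition_class_list v.mem g j))))).toNat % 32) - 1#32).toNat := by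
        u_resolve
        apply Nat.mod_eq_of_lt
        exact BitVec.isLt _
      rw [h, sw_zx8 _ hcb256]
    · -- r14d = k = 0
      rw [w_r14]
      rfl
    · -- [rsp + 0x18] = g
      have h : s_110e6f.mem.readLE (u.reg .rsp - 2976) 8 = (addr g).toNat := by
        u_resolve
      rw [h]
      exact hT0
    · -- [rsp] = cval = 0
      have h : s_110e6f.mem.readLE (u.reg .rsp - 3000) 4 =
          (BitVec.ofNat 32 ((BitVec.zeroExtend 32 (BitVec.setWidth 8 (BitVec.zeroExtend 32 (BitVec.ofNat 8
            (Floor1.class_subclasses v.mem g (Floor1.partition_class_list v.mem g j)))))).toNat % 4294967296)).toNat := by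
        u_resolve
        apply Nat.mod_eq_of_lt
        exact BitVec.isLt _
      rw [h, zx_sw_zx8 _ hcb256, hcb0]
      rfl
  · -- stop C, 0x110f2e: `cbits ≠ 0`, `r13 = c`
    have hjP : j < Floor1.partitions v.mem g := by
      rw [zx8_toInt _ (Floor1.partitions_lt _ _), ofNat32_toInt j (by omega)] at hbr_110e90
      omega
    have hcb256 := Floor1.class_subclasses_lt v.mem g pc
    have hcbne : Floor1.class_subclasses v.mem g pc ≠ 0 := by
      rw [zx_sw_zx8 _ hcb256] at hbr_110eee
      exact hbr_110eee
    have hmb256 : Floor1.class_masterbooks v.mem g pc < 256 := by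
      simp only [vacc]
      exact v.mem.u8_lt _
    subst hpc
    refine ReachVia.done (HeadExit.decode w_rip ⟨w_rsp, w_kept.get .rbp rfl, w_kept.get .r15 rfl, w_eq, ?_, ?_, ?_⟩ hjP
      ⟨?_, ?_, ?_, ?_⟩ hcbne ?_)
    · v_inv
    · u_same
    · v_untouched
    · -- [rsp + 0x38] = pclass
      have h : s_110f29r.mem.readLE (u.reg .rsp - 2944) 4 =
          (BitVec.zeroExtend 32 (BitVec.ofNat 8 (Floor1.partition_class_list v.mem g j))).toNat := by
        u_resolve
        apply Nat.mod_eq_of_lt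
        exact BitVec.isLt _
      rw [h]
      exact zx8_toNat _ hpc256
    · -- [rsp + 0x10] = cdim
      have h : s_110f29r.mem.readLE (u.reg .rsp - 2984) 4 =
          (BitVec.zeroExtend 32 (BitVec.ofNat 8 (Floor1.class_dimensions v.mem g
            (Floor1.partition_class_list v.mem g j)))).toNat := by
        u_resolve
        apply Nat.mod_eq_of_lt
        exact BitVec.isLt _
      rw [h]
      exact zx8_toNat _ (by simp only [vacc]; exact v.mem.u8_lt _)
    · -- [rsp + 0x2c] = cbits
      have h : s_110f29r.mem.readLE (u.reg .rsp - 2956) 4 =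
          (BitVec.zeroExtend 32 (BitVec.setWidth 8 (BitVec.zeroExtend 32 (BitVec.ofNat 8
            (Floor1.class_subclasses v.mem g (Floor1.partition_class_list v.mem g j)))))).toNat := by
        u_resolve
        apply Nat.mod_eq_of_lt
        exact BitVec.isLt _
      rw [h]
      exact zx_sw_zx8 _ hcb256
    · -- [rsp + 0x30] = csub
      have h : s_110f29r.mem.readLE (u.reg .rsp - 2952) 4 =
          (1#32 <<< ((BitVec.setWidth 8 (BitVec.zeroExtend 32 (BitVec.ofNat 8
            (Floor1.class_subclasses v.mem g (Floor1.partition_class_list v.mem g j))))).toNat % 32) - 1#32).toNat := by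
        u_resolve
        apply Nat.mod_eq_of_lt
        exact BitVec.isLt _
      rw [h, sw_zx8 _ hcb256]
    · -- r13 = c = codebooks + 2120 · masterbook
      rw [w_r13, sw64_zx8 _ hmb256]
      show addr (stb_vorbis.codebooks v.mem f) + addr _ * 2120 = _
      rw [addr_mul_lit, addr_add_addr]
      simp only [vacc, voff]
      congr 1
      omega

/-- `Bits` after the head's stores (the own frame only). -/
theorem bits_head {u₀ : State} {others : List Obj} {frames : List (Nat × FrameLayout)} {len : Nat} {Ar : Arena}
    {stored room : Int} {mode : Nat} {ysz : Nat → Nat} {u : State} {ret : Word} {ls : Int} {v w : State}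
    (hst : Stable u₀ others frames len Ar stored room mode ysz u ret ls v) (hk : HeadKeeps u₀ u v w) :
    Bits (RunBlk Ar len) len w.mem (fOf u) := by
  have hb := hst.inv.fb.vorbis.bits
  have hoff := hst.inv.objOff
  have hfin := hb.OBR
  simp only [voff] at hoff hfin
  have hroom := hst.entry.room
  have htop := hst.entry.top
  simp only [Vorbis.conv_stackLo, Vorbis.conv_stackHi] at hroom htop
  apply hb.frame
  apply ObjSame.of_sameExcept hk.same (by simp only [voff]; omega)
  intro s hs
  simp only [List.mem_cons, List.mem_nil_iff, or_false] at hs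
  rcases hs with rfl | rfl | rfl <;> simp only [] <;> omega

/-- **The refill of the bit buffer** (0x110f2e … 0x110f3b: `cmp [f.valid_bits], 9 ; jle → prep_huffman(f)`). -/
theorem refill_reach (Lay : Layout) (hLay : Lay.hi = 0x1000000) (μ : Microarch) (hμ : UserX.MicroOK μ) (u₀ : State)
    (hcode : HasCodeNat Lay u₀ Vorbis.L.vorbis_decode_packet_rest.entry Vorbis.Code.code_vorbis_decode_packet_rest.nat
      Vorbis.L.vorbis_decode_packet_rest.size)
    (h_prep : ∀ (others : List Obj) (frames : List (Nat × FrameLayout)) (Blk : Block → Prop) (len : Nat),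
      Calls Lay μ Vorbis.WayInv (Vorbis.conv u₀) Vorbis.L.prep_huffman.entry (Vorbis.Spec.prep_huffman.spec others frames Blk len))
    (others : List Obj) (frames : List (Nat × FrameLayout)) (len : Nat) (Ar : Arena) (stored room : Int)
    (mode : Nat) (ysz : Nat → Nat) (u : State) (ret : Word) (i j : Nat) (v : State)
    (hat : At3 u₀ others frames len Ar stored room mode ysz u ret i j v) (g pc c : Nat) (m : State)
    (hrip : m.rip = Vorbis.L.vorbis_decode_packet_rest.ret29) (hk : HeadKeeps u₀ u v m) (slots : Head3Slots u v m g pc)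
    (hr13 : m.reg .r13 = addr c) :
    ReachVia Lay μ Vorbis.WayInv m (At3Mid u₀ u v (RunBlk Ar len) len g pc c Vorbis.L.vorbis_decode_packet_rest.at_110f3b) := by
  have he := hat.entry
  v_entry he
  clear he_eq
  have hst := hat.toStable
  have w_rip := hrip
  have hm_rsp := hk.rsp
  have w_eq := hk.code
  have hdf : m.flags .df = false := (show abiInv _ from hk.abi).1
  have hmx : m.mxcsr &&& 0x1F80 = 0x1F80 := (show abiInv _ from hk.abi).2
  have hsse := Vorbis.sseOK_of_abiInv hk.abi
  have hprep := h_prep others (framesIn frames u) (RunBlk Ar len) len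
  have hbm := bits_head hst hk
  have hsm := hk.segSame
  have hm_rbp : m.reg .rbp = addr (fOf u) := by
    rw [hk.rbp]
    exact eq_addr _ _ hat.rbp
  have hfin := hbm.OBR
  have hfoff := hst.inv.objOff
  simp only [voff] at hfin hfoff
  have eF2 : addr (fOf u) + 1768 = addr (fOf u + 1768) := addr_add_lit (fOf u) 1768
  have hT6 : (addr (fOf u + 1768)).toNat = fOf u + 1768 := toNat_addr _ (by omega)
  have hT0 : (addr (fOf u)).toNat = fOf u := toNat_addr _ (by omega)
  obtain ⟨VB, hVB⟩ : ∃ VB : Nat, m.mem.readLE (addr (fOf u + 1768)) 4 = VB := ⟨_, rfl⟩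
  have hacc : Lay.Has (addr (fOf u + 1768)) 4 :=
    (hst.inv.fb.vorbis.bits.site_field hst.inv.live 1768 4 (by omega) (by omega) rfl).has hst.inv.fb.env.covers
      (by rw [hLay]; decide)
  u_walk hcode [hμ.vendor, eF2] until [Vorbis.L.vorbis_decode_packet_rest.at_110f3b] span [Vorbis.L.textLo, Vorbis.L.textHi] side (v_side)
  case call_inv => v_inv
  case pre_110c60 =>
    have h2 : ShadowUntouched m.mem s_110c60.mem := by v_untouched
    have hun' : ShadowUntouched v.mem s_110c60.mem := Mem.EqOn.trans hk.un h2
    have hsame' : Mem.SameExcept (seg3Wins u) v.mem s_110c60.mem := by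
      rw [w_mem]
      exact seg3Wins_push hsm _ _ _ (by u_omega) (by u_omega)
    have hkeep := Vorbis.Spec.Reader.store_off_obj hbm (u.reg .rsp - 3008) 8
      (UInt64.toNat (Vorbis.L.vorbis_decode_packet_rest.ret29 - 713)) (by u_omega) (by u_omega)
    rw [← w_mem] at hkeep
    have hinv' := seg3_inv_step hst hsame' hun' hkeep.1.bits
    have hsh' : ShadowPre others (framesIn frames u) s_110c60 := by
      refine ⟨?_, hst.pre.1.offText⟩
      have e : (s_110c60.reg .rsp).toNat + 8 = (spOf u).toNat := by
        rw [w_rsp]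
        show (u.reg .rsp - 3008).toNat + 8 = (u.reg .rsp - 3000).toNat
        u_omega
      rw [e]
      exact hst.shadow.untouched hun'
    have erdi : (s_110c60.reg .rdi).toNat = fOf u := by
      rw [w_rdi]
      exact hT0
    apply Vorbis.Spec.PacketRestTest.readerPre_of_inv s_110c60 hsh'
    rw [erdi]
    exact hinv'
  · -- after prep_huffman (0x110c65): `jmp 110f3b`
    have c_rdi : (s_110c60.reg .rdi).toNat = fOf u := by
      rw [w_rdi_110c60]
      exact hT0
    have hp : PrepHuffmanPost (RunBlk Ar len) len (s_110c60.reg .rdi).toNat s_110c60 s_110c60r := w_post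
    rw [c_rdi] at hp
    have w_eq := Vorbis.conv_code_eqOn w_code
    simp only [X86.User.Spec.footprint, vspec, w_rsp_110c60, w_rdi_110c60, hT0] at w_same
    have h2 : ShadowUntouched m.mem s_110c60.mem := by
      rw [w_mem_110c60]
      v_untouched
    have hunr : ShadowUntouched v.mem s_110c60r.mem := Mem.EqOn.trans (Mem.EqOn.trans hk.un h2) hp.untouched
    have hsame' : Mem.SameExcept (seg3Wins u) v.mem s_110c60.mem := by
      rw [w_mem_110c60]
      exact seg3Wins_push hsm _ _ _ (by u_omega) (by u_omega)
    have hsamer : Mem.SameExcept (seg3Wins u) v.mem s_110c60r.mem :=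
      seg3Wins_through_callee hsame' w_same (by u_omega) (by u_omega)
    have hdfr : s_110c60r.flags .df = false := (show X86.User.abiInv _ from w_inv).1
    have hmxr : s_110c60r.mxcsr &&& 8064 = 8064 := (show X86.User.abiInv _ from w_inv).2
    have hsser := Vorbis.sseOK_of_abiInv w_inv
    have hbr : Bits (RunBlk Ar len) len s_110c60r.mem (fOf u) := hp.reader.bits
    have hslr : Head3Slots u v s_110c60r g pc :=
      slots.through w_mem_110c60 (by u_omega) w_same (by u_omega) he_room he_top hfoff
    have hr_rbp : s_110c60r.reg .rbp = v.reg .rbp := by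
      rw [w_kept .rbp rfl]
      exact hk.rbp
    have hr_r15 : s_110c60r.reg .r15 = v.reg .r15 := by
      rw [w_kept .r15 rfl]
      exact hk.r15
    have hr_r13 : s_110c60r.reg .r13 = addr c := by
      rw [w_kept .r13 rfl]
      exact hr13
    have hr_rsp := w_rsp
    clear w_kept w_same
    u_walk hcode [hμ.vendor] until [Vorbis.L.vorbis_decode_packet_rest.at_110f3b] span [Vorbis.L.textLo, Vorbis.L.textHi] side (v_side)
    refine ReachVia.done ⟨?_, ?_, ?_, ?_, ?_, w_eq, ?_, ?_, ?_, ?_, ?_⟩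
    · rw [w_rip]
    · rw [w_kept .rsp rfl]
      exact hr_rsp
    · rw [w_kept .rbp rfl]
      exact hr_rbp
    · rw [w_kept .r15 rfl]
      exact hr_r15
    · rw [w_kept .r13 rfl]
      exact hr_r13
    · v_inv
    · rw [w_mem]
      exact hsamer
    · rw [w_mem]
      exact hunr
    · rw [w_mem]
      exact hbr
    · exact hslr.of_mem_eq w_mem
  · -- `valid_bits > 9`: nothing was written
    refine ReachVia.done ⟨?_, ?_, ?_, ?_, ?_, w_eq, ?_, ?_, ?_, ?_, ?_⟩
    · rw [w_rip]
      rfl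
    · rw [w_kept .rsp rfl]
      exact hm_rsp
    · rw [w_kept .rbp rfl]
      exact hk.rbp
    · rw [w_kept .r15 rfl]
      exact hk.r15
    · rw [w_kept .r13 rfl]
      exact hr13
    · v_inv
    · rw [w_mem]
      exact hsm
    · rw [w_mem]
      exact hk.un
    · rw [w_mem]
      exact hbm
    · exact slots.of_mem_eq w_mem


/-- **SEGMENT .3a**: the head (`head_reach`) and the refill (`refill_reach`) chained by `ReachVia.trans`; the two early exits are built
by `at5_step` / `at4_step`, the third exit is the join 0x110f3b with the master book number `mb = g->class_masterbooks[pclass]`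
(`< codebook_count`: `Floor1OK.master_lt`). -/
theorem seg3a_reach (Lay : Layout) (hLay : Lay.hi = 0x1000000) (μ : Microarch) (hμ : UserX.MicroOK μ) (u₀ : State)
    (hcode : HasCodeNat Lay u₀ Vorbis.L.vorbis_decode_packet_rest.entry Vorbis.Code.code_vorbis_decode_packet_rest.nat
      Vorbis.L.vorbis_decode_packet_rest.size)
    (h_prep : ∀ (others : List Obj) (frames : List (Nat × FrameLayout)) (Blk : Block → Prop) (len : Nat),
      Calls Lay μ Vorbis.WayInv (Vorbis.conv u₀) Vorbis.L.prep_huffman.entry (Vorbis.Spec.prep_huffman.spec others frames Blk len))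
    (hl1 : Asan.SmallCheck Lay μ Vorbis.WayInv (Vorbis.CodeOK u₀) [.rax, .rdx] 1 Vorbis.L.__asan_load1_noabort.entry)
    (hl8 : Asan.SmallCheck Lay μ Vorbis.WayInv (Vorbis.CodeOK u₀) [.rax, .rcx, .rdx] 8 Vorbis.L.__asan_load8_noabort.entry)
    (hl4 : Asan.SmallCheck Lay μ Vorbis.WayInv (Vorbis.CodeOK u₀) [.rax, .rcx, .rdx] 4 Vorbis.L.__asan_load4_noabort.entry) :
    Vorbis.Spec.vorbis_decode_packet_rest.Seg3a Lay μ u₀ := by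
  intro others frames len Ar stored room mode ysz u ret i j v hat
  have hst := hat.toStable
  apply (head_reach Lay hLay μ hμ u₀ hcode hl1 hl8 hl4 others frames len Ar stored room mode ysz u ret i j v hat).trans
  intro w hw
  cases hw with
  | done rip keeps hge =>
    -- 0x111000: `j ≥ partitions` → segment .5
    exact ReachVia.done (Or.inl (at5_step hat keeps.segSame keeps.un (bits_head hst keeps) keeps.rsp keeps.code keeps.abi
      rip keeps.r15))
  | nobits rip keeps hlt slots cbits r14 s18 s00 =>
    -- 0x110d0a with `cbits = 0` → segment .4
    exact ReachVia.done (Or.inr (Or.inl (at4_step hat keeps.segSame keeps.un (bits_head hst keeps) keeps.rsp keeps.code keeps.abi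
      rip keeps.rbp r14 hlt slots s18)))
  | decode rip keeps hlt slots cbits r13 =>
    -- 0x110f2e with `cbits ≠ 0`: the refill, then the join 0x110f3b
    have hg1 := hst.inv.fb.vorbis.floor.floor hat.g
    have hmb := hg1.master_lt hlt cbits
    apply (refill_reach Lay hLay μ hμ u₀ hcode h_prep others frames len Ar stored room mode ysz u ret i j v hat _ _ _ w rip keeps
      slots r13).trans
    intro w2 hmid
    exact ReachVia.done (Or.inr (Or.inr ⟨hlt, _, hmb, hmid⟩))


end Vorbis.Spec.vorbis_decode_packet_rest_3a
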